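-- pv_equiv track=rewrite | github.com/mjalkio/advent-of-code | year_2020/day21/allergen_assessment.py | get_num_occurences_of_ingredients
-- ===== SOURCE A (Python) =====
-- from collections import Counter
--
-- def _parse_foods(puzzle_input):
--     food_list = [line for line in puzzle_input.split("\n") if line != ""]
--
--     ingredients_and_allergens = []
--     for food_line in food_list:
--         ingredients_definition, allergens_definition = food_line.split(" (contains ")
--         allergens = allergens_definition[:-1].split(", ")
--         ingredients = ingredients_definition.split(" ")
--         ingredients_and_allergens.append((ingredients, allergens))
--     return ingredients_and_allergens
--
-- def get_num_occurences_of_ingredients(puzzle_input, ingredients):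
--     ingredients_and_allergens = _parse_foods(puzzle_input)
--     ingredient_counts = Counter(
--         ingredient
--         for ingredients, _ in ingredients_and_allergens
--         for ingredient in ingredients
--     )
--     return sum(ingredient_counts[ingredient] for ingredient in ingredients)
-- ===== SOURCE B (Python) =====
-- def get_num_occurences_of_ingredients(puzzle_input, ingredients):
--     # Count the query multiset once, then single pass over every food ingredient.
--     query_counts = {}
--     for ing in ingredients:
--         query_counts[ing] = query_counts.get(ing, 0) + 1
--     total = 0
--     for line in puzzle_input.split("\n"):
--         if line == "":
--             continue
--         ingredients_part, _ = line.split(" (contains ")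
--         for word in ingredients_part.split(" "):
--             total += query_counts.get(word, 0)
--     return total
-- ===== Notes on version B (the rewrite author's own statement) =====
-- stated objective: alternative
-- what changed: Inverts the shape: instead of counting all food ingredients into a Counter and summing lookups of the query, B counts the query multiset once and makes a single accumulating pass over the food ingredients; it also drops parsing of allergens entirely.
import Mathlib
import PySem

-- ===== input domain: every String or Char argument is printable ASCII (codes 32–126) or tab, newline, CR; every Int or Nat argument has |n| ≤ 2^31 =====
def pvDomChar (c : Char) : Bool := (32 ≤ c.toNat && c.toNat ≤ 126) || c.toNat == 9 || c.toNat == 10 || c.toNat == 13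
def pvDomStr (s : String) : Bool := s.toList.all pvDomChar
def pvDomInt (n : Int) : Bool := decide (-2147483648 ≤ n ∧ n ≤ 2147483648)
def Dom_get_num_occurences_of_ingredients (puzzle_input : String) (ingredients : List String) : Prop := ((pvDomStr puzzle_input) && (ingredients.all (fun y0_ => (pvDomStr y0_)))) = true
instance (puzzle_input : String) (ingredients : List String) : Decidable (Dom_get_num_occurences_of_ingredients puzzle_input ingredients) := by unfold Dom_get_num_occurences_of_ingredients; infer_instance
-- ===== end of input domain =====

-- B inverts A's shape: it counts the query multiset once and makes one accumulating
-- pass over the food ingredients (and never parses allergens); same cost, different decomposition.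

-- ===== PORT A =====
-- str.split(sep) for the nonempty literal separators used here (split? is none only for sep = "")
def pySplit (s sep : String) : List String := (PySem.Str.split? s sep).getD []

def get_num_occurences_of_ingredients (puzzle_input : String) (ingredients : List String) : Int :=
  let food_list := (pySplit puzzle_input "\n").filter (fun line => line != "")
  let ingredients_and_allergens : List (List String × List String) :=
    food_list.foldl (fun acc food_line =>
      let parts := pySplit food_line " (contains "
      let ingredients_definition := PySem.List.pyGetD parts 0 ""
      let allergens_definition := PySem.List.pyGetD parts 1 ""
      let allergens := pySplit (PySem.Str.slice allergens_definition none (some (-1))) ", "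
      let ings := pySplit ingredients_definition " "
      acc ++ [(ings, allergens)]) []
  let ingredient_counts :=
    PySem.Dict.counter (ingredients_and_allergens.foldl (fun acc p => acc ++ p.1) [])
  ingredients.foldl (fun s ingredient => s + ingredient_counts.getD ingredient 0) 0

-- ===== PORT B =====
def get_num_occurences_of_ingredients_alt (puzzle_input : String) (ingredients : List String) : Int :=
  let query_counts : PySem.Dict String Int :=
    ingredients.foldl (fun d ing => d.insert ing (d.getD ing 0 + 1)) PySem.Dict.empty
  (pySplit puzzle_input "\n").foldl (fun total line =>
    if line == "" then total
    else
      (pySplit (PySem.List.pyGetD (pySplit line " (contains ") 0 "") " ").foldl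
        (fun t word => t + query_counts.getD word 0) total) 0

-- ===== PRECONDITION & SPEC =====
-- A raises ValueError (tuple unpacking) on any nonempty line that does not split into
-- exactly two pieces around " (contains "; Pre_ excludes exactly those inputs.
def Pre_get_num_occurences_of_ingredients (puzzle_input : String) (ingredients : List String) : Prop :=
  ((pySplit puzzle_input "\n").all
    (fun line => line == "" || (pySplit line " (contains ").length == 2)) = true
instance (puzzle_input : String) (ingredients : List String) : Decidable (Pre_get_num_occurences_of_ingredients puzzle_input ingredients) := by unfold Pre_get_num_occurences_of_ingredients; infer_instance

def pvWitness_get_num_occurences_of_ingredients : String × List String :=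
  ("a b (contains x)\nc (contains y, z)\n", ["b", "b", "c"])


def Spec_get_num_occurences_of_ingredients (puzzle_input : String) (ingredients : List String) (out : Int) : Prop := out = get_num_occurences_of_ingredients_alt puzzle_input ingredients
instance (puzzle_input : String) (ingredients : List String) (out : Int) : Decidable (Spec_get_num_occurences_of_ingredients puzzle_input ingredients out) := by unfold Spec_get_num_occurences_of_ingredients; infer_instance

-- ===== CLAIM (what is proved, stated in full; the proofs are below) =====
def Claim_equal_get_num_occurences_of_ingredients : Prop := ∀ (puzzle_input : String) (ingredients : List String), Dom_get_num_occurences_of_ingredients puzzle_input ingredients → Pre_get_num_occurences_of_ingredients puzzle_input ingredients → Spec_get_num_occurences_of_ingredients puzzle_input ingredients (get_num_occurences_of_ingredients puzzle_input ingredients)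

-- ===== LEMMAS AND PROOFS =====

-- a foldl accumulating '+ f x' is the starting value plus the sum of the mapped list
theorem pv_foldl_add_isum {α : Type} (f : α → Int) (l : List α) (a : Int) :
    l.foldl (fun s x => s + f x) a = a + (l.map f).sum := by
  induction l generalizing a with
  | nil => simp
  | cons x xs ih => simp [List.foldl_cons, ih, add_assoc]

theorem pv_sum_map_flatMap {α β : Type} (l : List α) (f : α → List β) (g : β → Int) :
    (((l.flatMap f).map g).sum) = (l.map (fun x => ((f x).map g).sum)).sum := by
  induction l with
  | nil => simp
  | cons x xs ih => simp [List.flatMap_cons, ih]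

-- a skip-empty foldl with an additive body is the sum over the filtered list
theorem pv_foldl_skip {α : Type} (p : α → Bool) (g : α → Int) (l : List α) (a : Int) :
    l.foldl (fun t x => if p x then t else t + g x) a
      = a + ((l.filter (fun x => !p x)).map g).sum := by
  induction l generalizing a with
  | nil => simp
  | cons x xs ih =>
    by_cases h : p x <;> simp [List.foldl_cons, h, ih, add_assoc]

theorem pv_sum_ite_count (L : List String) (a : String) :
    (L.map (fun y => if y == a then (1 : Int) else 0)).sum = (L.count a : Int) := by
  induction L with
  | nil => simp
  | cons y ys ih =>
    simp only [List.map_cons, List.sum_cons, List.count_cons, ih]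
    by_cases h : y = a
    · subst h; simp; omega
    · have h2 : (y == a) = false := by simp [h]
      simp [h2]
theorem pv_sum_count_symm (q L : List String) :
    (q.map (fun x => (L.count x : Int))).sum = (L.map (fun y => (q.count y : Int))).sum := by
  induction q with
  | nil => simp
  | cons a q ih =>
    have key : ∀ y : String, ((a :: q).count y : Int)
        = (q.count y : Int) + (if y == a then (1:Int) else 0) := by
      intro y; simp only [List.count_cons]
      by_cases h : y = a
      · subst h; simp
      · have h2 : (y == a) = false := by simp [h]
        have h3 : (a == y) = false := by simp [Ne.symm h]
        simp [h2, h3]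
    calc (List.map (fun x => (L.count x : Int)) (a :: q)).sum
        = (L.count a : Int) + (q.map (fun x => (L.count x : Int))).sum := by simp
      _ = (L.map (fun y => (q.count y : Int))).sum + (L.map (fun y => if y == a then (1:Int) else 0)).sum := by
            rw [ih, pv_sum_ite_count]; ring
      _ = (L.map (fun y => (q.count y : Int) + (if y == a then (1:Int) else 0))).sum := by
            rw [List.sum_map_add]
      _ = (L.map (fun y => ((a :: q).count y : Int))).sum := by
            rw [List.map_congr_left (fun y _ => (key y).symm)]

-- ===== VERDICT (by name: the statement is the Claim_ definition above) =====
theorem get_num_occurences_of_ingredients_spec : Claim_equal_get_num_occurences_of_ingredients := by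
  intro puzzle_input ingredients _ _
  unfold Spec_get_num_occurences_of_ingredients
  unfold get_num_occurences_of_ingredients get_num_occurences_of_ingredients_alt
  simp only [PySem.List.foldl_append_singleton_eq_map, PySem.List.foldl_append_eq_flatMap,
    PySem.Dict.foldl_insert_getD_add_one_eq_counter]
  simp only [pv_foldl_add_isum, PySem.Dict.getD_counter, pv_foldl_skip, zero_add]
  simp only [List.nil_append, List.flatMap_map]
  rw [pv_sum_count_symm, pv_sum_map_flatMap]
  simp [bne]
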